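-- pv_equiv track=rewrite | github.com/solentlabs/cable_modem_monitor | tests/integration/mock_handlers/form_ajax.py | _parse_credentials
-- ===== SOURCE A (Python) =====
-- def _parse_credentials(credential_str: str) -> tuple[str, str]:
--     """Parse credentials from format string.
--
--     Expected format: "username={user}:password={pass}"
--
--     Args:
--         credential_str: Decoded credential string.
--
--     Returns:
--         Tuple of (username, password).
--     """
--     username = ""
--     password = ""
--
--     # Parse "username=X:password=Y" format
--     parts = credential_str.split(":")
--     for part in parts:
--         if part.startswith("username="):
--             username = part[9:]
--         elif part.startswith("password="):
--             password = part[9:]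
--
--     return username, password
-- ===== SOURCE B (Python) =====
-- def _parse_credentials(credential_str: str) -> tuple[str, str]:
--     """Parse "username={user}:password={pass}" via a key->value table."""
--     fields = {}
--     for part in credential_str.split(":"):
--         i = part.find("=")
--         if i != -1:
--             fields[part[:i]] = part[i + 1:]
--     return fields.get("username", ""), fields.get("password", "")
-- ===== Notes on version B (the rewrite author's own statement) =====
-- stated objective: idiomatic
-- what changed: Instead of testing each part against the two fixed prefixes 'username='/'password=' with slice offsets, B builds a key->value dict from every 'key=value' part (split at the first '=') and then looks up 'username' and 'password' with defaults.
import Mathlib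
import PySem

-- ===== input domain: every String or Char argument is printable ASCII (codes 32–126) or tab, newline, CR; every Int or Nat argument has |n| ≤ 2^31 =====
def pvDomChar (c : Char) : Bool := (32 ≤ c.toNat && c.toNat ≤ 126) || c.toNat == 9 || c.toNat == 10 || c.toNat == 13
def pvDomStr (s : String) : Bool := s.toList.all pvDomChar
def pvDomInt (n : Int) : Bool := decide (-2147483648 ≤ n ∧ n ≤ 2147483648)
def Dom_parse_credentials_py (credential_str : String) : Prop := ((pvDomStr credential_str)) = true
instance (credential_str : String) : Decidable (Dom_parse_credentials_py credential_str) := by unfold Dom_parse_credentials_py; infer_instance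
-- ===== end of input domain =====

-- B replaces A's two fixed-prefix slice branches by a key→value table built from every
-- "key=value" part, then looks the two fields up; idiomatic, same cost.

-- ===== PORT A =====
-- step of A's for-loop: test the two fixed prefixes and overwrite the matching field
def pvStepA (st : List Char × List Char) (part : List Char) : List Char × List Char :=
  if PySem.Chars.startswith part "username=".toList then
    (PySem.Chars.slice part (some 9) none, st.2)
  else if PySem.Chars.startswith part "password=".toList then
    (st.1, PySem.Chars.slice part (some 9) none)
  else st

def parse_credentials_py (credential_str : String) : String × String :=
  let parts := PySem.Chars.splitOn credential_str.toList [':']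
  let r := parts.foldl pvStepA ([], [])
  (String.ofList r.1, String.ofList r.2)

-- ===== PORT B =====
-- step of B's for-loop: store key→value for every part that contains '='
def pvStepB (d : PySem.Dict (List Char) (List Char)) (part : List Char) :
    PySem.Dict (List Char) (List Char) :=
  let i := PySem.Chars.find part ['=']
  if i ≠ -1 then
    d.insert (PySem.Chars.slice part none (some i)) (PySem.Chars.slice part (some (i + 1)) none)
  else d

def parse_credentials_py_alt (credential_str : String) : String × String :=
  let fields := (PySem.Chars.splitOn credential_str.toList [':']).foldl pvStepB PySem.Dict.empty
  (String.ofList (fields.getD "username".toList []),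
   String.ofList (fields.getD "password".toList []))

-- ===== PRECONDITION & SPEC =====
def Spec_parse_credentials_py (credential_str : String) (out : String × String) : Prop := out = parse_credentials_py_alt credential_str
instance (credential_str : String) (out : String × String) : Decidable (Spec_parse_credentials_py credential_str out) := by unfold Spec_parse_credentials_py; infer_instance

-- ===== CLAIM (what is proved, stated in full; the proofs are below) =====
def Claim_equal_parse_credentials_py : Prop := ∀ (credential_str : String), Dom_parse_credentials_py credential_str → Spec_parse_credentials_py credential_str (parse_credentials_py credential_str)

-- ===== LEMMAS AND PROOFS =====

-- the first '=' of pre ++ '=' :: rest sits at index pre.length when pre has no '='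
lemma pv_find_eq (pre rest : List Char) (h : '=' ∉ pre) :
    PySem.Chars.find (pre ++ '=' :: rest) ['='] = (pre.length : Int) := by
  have hocc : ('=' :: List.nil) <:+: (pre ++ '=' :: rest) := ⟨pre, rest, by simp⟩
  have hpos : 0 ≤ PySem.Chars.find (pre ++ '=' :: rest) ['='] :=
    (PySem.Chars.find_nonneg_iff _ _).mpr hocc
  obtain ⟨hpref, hmin⟩ := PySem.Chars.find_spec hpos
  set f := PySem.Chars.find (pre ++ '=' :: rest) ['='] with hf
  have hle : f.toNat ≤ pre.length := by
    by_contra hgt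
    exact hmin pre.length (by omega) ⟨rest, by simp⟩
  have hge : pre.length ≤ f.toNat := by
    by_contra hlt
    rw [not_le] at hlt
    rw [List.drop_append_of_le_length (by omega)] at hpref
    obtain ⟨t, ht⟩ := hpref
    rcases hdp : pre.drop f.toNat with _ | ⟨c, cs⟩
    · have hl := congrArg List.length hdp; simp at hl; omega
    · rw [hdp] at ht
      simp only [List.cons_append, List.cons.injEq] at ht
      have hc : c ∈ pre := List.mem_of_mem_drop (by rw [hdp]; exact List.mem_cons_self ..)
      exact h (ht.1 ▸ hc)
  omega

-- one part: A's branch update matches B's dict update on the two fields of interest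
lemma pv_step (d : PySem.Dict (List Char) (List Char)) (part : List Char) :
    pvStepA (d.getD "username".toList [], d.getD "password".toList []) part
      = ((pvStepB d part).getD "username".toList [], (pvStepB d part).getD "password".toList []) := by
  unfold pvStepA pvStepB
  by_cases hu : PySem.Chars.startswith part "username=".toList = true
  · obtain ⟨rest, hrest⟩ := (PySem.Chars.startswith_iff _ _).mp hu
    have hform : ("username=".toList : List Char) = "username".toList ++ ['='] := by decide
    rw [hform, List.append_assoc, List.singleton_append] at hrest
    subst hrest
    rw [if_pos hu]
    have hfind := pv_find_eq "username".toList rest (by decide)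
    simp only [PySem.Chars.slice_eq_listSlice, hfind]
    rw [if_pos (by decide)]
    have h9 : (("username".toList.length : Int) + 1) = ((9 : Nat) : Int) := by decide
    rw [h9, PySem.List.slice_to _ (by positivity),
        PySem.List.slice_from _ (by positivity), PySem.List.slice_from _ (by norm_num)]
    simp [PySem.Dict.getD_insert]
  · by_cases hp : PySem.Chars.startswith part "password=".toList = true
    · obtain ⟨rest, hrest⟩ := (PySem.Chars.startswith_iff _ _).mp hp
      have hform : ("password=".toList : List Char) = "password".toList ++ ['='] := by decide
      rw [hform, List.append_assoc, List.singleton_append] at hrest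
      subst hrest
      rw [if_neg hu, if_pos hp]
      have hfind := pv_find_eq "password".toList rest (by decide)
      simp only [PySem.Chars.slice_eq_listSlice, hfind]
      rw [if_pos (by decide)]
      have h9 : (("password".toList.length : Int) + 1) = ((9 : Nat) : Int) := by decide
      rw [h9, PySem.List.slice_to _ (by positivity),
          PySem.List.slice_from _ (by positivity), PySem.List.slice_from _ (by norm_num)]
      simp [PySem.Dict.getD_insert]
    · rw [if_neg hu, if_neg hp]
      by_cases hf : PySem.Chars.find part ['='] = -1
      · rw [if_neg (by simpa using hf)]
      · rw [if_pos (by simpa using hf)]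
        have hpos : 0 ≤ PySem.Chars.find part ['='] := by
          have := PySem.Chars.neg_one_le_find part ['=']
          omega
        obtain ⟨hpref, _⟩ := PySem.Chars.find_spec hpos
        set f := PySem.Chars.find part ['='] with hfd
        obtain ⟨t, ht⟩ := hpref
        have hsplit : part = part.take f.toNat ++ '=' :: t := by
          have h2 := List.take_append_drop f.toNat part
          rw [← ht] at h2
          simpa using h2.symm
        have hknu : part.take f.toNat ≠ "username".toList := by
          intro he
          apply hu
          rw [PySem.Chars.startswith_iff]
          refine ⟨t, ?_⟩
          have hform : ("username=".toList : List Char) = "username".toList ++ ['='] := by decide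
          rw [hform, List.append_assoc, List.singleton_append, ← he, ← hsplit]
        have hknp : part.take f.toNat ≠ "password".toList := by
          intro he
          apply hp
          rw [PySem.Chars.startswith_iff]
          refine ⟨t, ?_⟩
          have hform : ("password=".toList : List Char) = "password".toList ++ ['='] := by decide
          rw [hform, List.append_assoc, List.singleton_append, ← he, ← hsplit]
        simp only [PySem.Chars.slice_eq_listSlice]
        rw [PySem.List.slice_to _ hpos, PySem.Dict.getD_insert, PySem.Dict.getD_insert,
           if_neg (Ne.symm hknu), if_neg (Ne.symm hknp)]

-- the whole loops: A's running pair tracks B's dict on the two fields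
lemma pv_loop (parts : List (List Char)) (d : PySem.Dict (List Char) (List Char)) :
    parts.foldl pvStepA (d.getD "username".toList [], d.getD "password".toList [])
      = ((parts.foldl pvStepB d).getD "username".toList [],
         (parts.foldl pvStepB d).getD "password".toList []) := by
  induction parts generalizing d with
  | nil => rfl
  | cons p ps ih => simp only [List.foldl_cons, pv_step d p]; exact ih (pvStepB d p)

-- ===== VERDICT (by name: the statement is the Claim_ definition above) =====
theorem parse_credentials_py_spec : Claim_equal_parse_credentials_py := by
  intro s _
  unfold Spec_parse_credentials_py parse_credentials_py parse_credentials_py_alt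
  simp only []
  have h0 : (([], []) : List Char × List Char)
      = ((PySem.Dict.empty : PySem.Dict (List Char) (List Char)).getD "username".toList [],
         (PySem.Dict.empty : PySem.Dict (List Char) (List Char)).getD "password".toList []) := by
    simp [PySem.Dict.getD_empty]
  rw [h0, pv_loop]
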